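-- pv_equiv track=rewrite | github.com/Eric-McKinney/advent_of_code_2023 | day_1/day_1.py | find_number_word
-- ===== SOURCE A (Python) =====
-- def find_number_word(s: str, reverse: bool) -> str:
--     digits = {
--         "one": "1",
--         "two": "2",
--         "three": "3",
--         "four": "4",
--         "five": "5",
--         "six": "6",
--         "seven": "7",
--         "eight": "8",
--         "nine": "9"
--     }
--
--     for digit in digits:
--         if not reverse and digit in s[:len(digit)]:
--             return digits[digit]
--         elif reverse and digit[-1::-1] in s[:len(digit)]:
--             return digits[digit]
--
--     return ""
-- ===== SOURCE B (Python) =====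
-- def find_number_word(s: str, reverse: bool) -> str:
--     words = {
--         "one": "1", "two": "2", "three": "3", "four": "4", "five": "5",
--         "six": "6", "seven": "7", "eight": "8", "nine": "9"
--     }
--     table = {3: {}, 4: {}, 5: {}}
--     for word, digit in words.items():
--         key = word[::-1] if reverse else word
--         table[len(word)][key] = digit
--     for length, sub in table.items():
--         digit = sub.get(s[:length])
--         if digit is not None:
--             return digit
--     return ""
-- ===== Notes on version B (the rewrite author's own statement) =====
-- stated objective: alternative
-- what changed: B replaces A's scan over all nine number-words (each tested with substring-in-prefix) by a length-indexed table {3,4,5} of word->digit dicts (words reversed on build when reverse=True) and answers with at most three prefix dict lookups.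
import Mathlib
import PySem

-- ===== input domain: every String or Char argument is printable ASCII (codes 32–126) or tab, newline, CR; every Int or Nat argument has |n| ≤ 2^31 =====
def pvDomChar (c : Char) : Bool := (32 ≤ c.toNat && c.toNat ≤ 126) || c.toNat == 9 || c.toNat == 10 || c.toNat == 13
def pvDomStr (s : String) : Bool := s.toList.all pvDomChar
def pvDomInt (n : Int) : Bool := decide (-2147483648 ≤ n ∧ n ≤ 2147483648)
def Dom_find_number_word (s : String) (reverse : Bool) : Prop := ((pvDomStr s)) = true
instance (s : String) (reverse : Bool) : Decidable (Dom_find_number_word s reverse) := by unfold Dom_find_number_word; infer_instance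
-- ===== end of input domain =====

-- B groups the nine number-words by length into a {3,4,5}-indexed table of dicts and answers with
-- three prefix lookups instead of scanning all nine words (objective: alternative decomposition).

-- ===== PORT A =====
-- the dict literal of A, as (key, value) items in insertion order
def fnwDigitsA : List (String × String) :=
  [("one", "1"), ("two", "2"), ("three", "3"), ("four", "4"), ("five", "5"),
   ("six", "6"), ("seven", "7"), ("eight", "8"), ("nine", "9")]

-- 'for digit in digits: …' — each branch's return stops the loop
def fnwLoopA (s : String) (reverse : Bool) : List (String × String) → String
  | [] => ""
  | (digit, v) :: rest =>
    if !reverse && PySem.Str.isIn digit (PySem.Str.slice s none (some (PySem.Str.len digit))) then v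
    else if reverse && PySem.Str.isIn ((PySem.Str.slice? digit (some (-1)) none (-1)).getD digit)
              (PySem.Str.slice s none (some (PySem.Str.len digit))) then v
    else fnwLoopA s reverse rest

def find_number_word (s : String) (reverse : Bool) : String :=
  fnwLoopA s reverse fnwDigitsA

-- ===== PORT B =====
-- 'for length, sub in table.items(): digit = sub.get(s[:length]); if digit is not None: return digit'
def fnwLoopB (s : String) : List (Int × PySem.Dict String String) → String
  | [] => ""
  | (length, sub) :: rest =>
    match sub.get? (PySem.Str.slice s none (some length)) with
    | some d => d
    | none => fnwLoopB s rest

def find_number_word_alt (s : String) (reverse : Bool) : String :=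
  let words : PySem.Dict String String := PySem.Dict.ofList
    [("one", "1"), ("two", "2"), ("three", "3"), ("four", "4"), ("five", "5"),
     ("six", "6"), ("seven", "7"), ("eight", "8"), ("nine", "9")]
  let table0 : PySem.Dict Int (PySem.Dict String String) :=
    PySem.Dict.ofList [(3, PySem.Dict.empty), (4, PySem.Dict.empty), (5, PySem.Dict.empty)]
  -- 'for word, digit in words.items(): key = word[::-1] if reverse else word; table[len(word)][key] = digit'
  let table := words.items.foldl (fun t p =>
    let key := if reverse then (PySem.Str.slice? p.1 none none (-1)).getD p.1 else p.1
    t.modify (PySem.Str.len p.1) PySem.Dict.empty (fun sub => sub.insert key p.2)) table0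
  fnwLoopB s table.items

-- ===== PRECONDITION & SPEC =====
def Spec_find_number_word (s : String) (reverse : Bool) (out : String) : Prop := out = find_number_word_alt s reverse
instance (s : String) (reverse : Bool) (out : String) : Decidable (Spec_find_number_word s reverse out) := by unfold Spec_find_number_word; infer_instance

-- ===== CLAIM (what is proved, stated in full; the proofs are below) =====
def Claim_equal_find_number_word : Prop := ∀ (s : String) (reverse : Bool), Dom_find_number_word s reverse → Spec_find_number_word s reverse (find_number_word s reverse)

-- ===== LEMMAS AND PROOFS =====

-- canonical chain both ports reduce to: first listed word that equals the same-length prefix of s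
def fnwChain (t : List Char) : List (List Char × String) → String
  | [] => ""
  | (w, d) :: r => if t.take w.length = w then d else fnwChain t r

def fnwPred (t : List Char) (p : List Char × String) : Bool := decide (t.take p.1.length = p.1)

theorem fnwChain_eq_find (t : List Char) (L : List (List Char × String)) :
    fnwChain t L = ((L.find? (fnwPred t)).map Prod.snd).getD "" := by
  induction L with
  | nil => rfl
  | cons p r ih =>
    obtain ⟨w, d⟩ := p
    by_cases h : t.take w.length = w <;> simp [fnwChain, List.find?, fnwPred, h, ih]

theorem find?_eq_of_perm_unique {α : Type} (p : α → Bool) (L L' : List α)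
    (hperm : L.Perm L')
    (uniq : ∀ a ∈ L, ∀ b ∈ L, p a → p b → a = b) :
    L.find? p = L'.find? p := by
  cases hL : L.find? p with
  | none =>
    rw [List.find?_eq_none] at hL
    symm; rw [List.find?_eq_none]
    intro x hx; exact hL x (hperm.mem_iff.mpr hx)
  | some a =>
    have hpa := List.find?_some hL
    have hma := List.mem_of_find?_eq_some hL
    have hsome : (L'.find? p).isSome := by
      rw [List.find?_isSome]; exact ⟨a, hperm.mem_iff.mp hma, hpa⟩
    obtain ⟨b, hb⟩ := Option.isSome_iff_exists.mp hsome
    have hpb := List.find?_some hb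
    have hmb := hperm.mem_iff.mpr (List.mem_of_find?_eq_some hb)
    rw [hb, uniq a hma b hmb hpa hpb]

-- at most one entry of a prefix-free word list length-take-matches t
theorem fnwUnique (t : List Char) (L : List (List Char × String))
    (hnp : ∀ p ∈ L, ∀ q ∈ L, p ≠ q → ¬ p.1 <+: q.1) :
    ∀ a ∈ L, ∀ b ∈ L, fnwPred t a → fnwPred t b → a = b := by
  intro a ha b hb hpa hpb
  simp only [fnwPred, decide_eq_true_eq] at hpa hpb
  by_contra hne
  rcases le_total a.1.length b.1.length with hle | hle
  · apply hnp a ha b hb hne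
    have h : t.take a.1.length = b.1.take a.1.length := by
      rw [← hpb, List.take_take, Nat.min_eq_left hle]
    rw [← hpa, h]; exact List.take_prefix _ _
  · apply hnp b hb a ha (Ne.symm hne)
    have h : t.take b.1.length = a.1.take b.1.length := by
      rw [← hpa, List.take_take, Nat.min_eq_left hle]
    rw [← hpb, h]; exact List.take_prefix _ _

theorem fnwChain_perm (t : List Char) (L L' : List (List Char × String))
    (hperm : L.Perm L')
    (hnp : ∀ p ∈ L, ∀ q ∈ L, p ≠ q → ¬ p.1 <+: q.1) :
    fnwChain t L = fnwChain t L' := by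
  rw [fnwChain_eq_find, fnwChain_eq_find,
      find?_eq_of_perm_unique (fnwPred t) L L' hperm (fnwUnique t L hnp)]

-- word lists (as char lists) in each port's visiting order
def fnwLAf : List (List Char × String) :=
  [("one".toList, "1"), ("two".toList, "2"), ("three".toList, "3"), ("four".toList, "4"),
   ("five".toList, "5"), ("six".toList, "6"), ("seven".toList, "7"), ("eight".toList, "8"),
   ("nine".toList, "9")]
def fnwLAt : List (List Char × String) :=
  [("eno".toList, "1"), ("owt".toList, "2"), ("eerht".toList, "3"), ("ruof".toList, "4"),
   ("evif".toList, "5"), ("xis".toList, "6"), ("neves".toList, "7"), ("thgie".toList, "8"),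
   ("enin".toList, "9")]
def fnwLBf : List (List Char × String) :=
  [("one".toList, "1"), ("two".toList, "2"), ("six".toList, "6"), ("four".toList, "4"),
   ("five".toList, "5"), ("nine".toList, "9"), ("three".toList, "3"), ("seven".toList, "7"),
   ("eight".toList, "8")]
def fnwLBt : List (List Char × String) :=
  [("eno".toList, "1"), ("owt".toList, "2"), ("xis".toList, "6"), ("ruof".toList, "4"),
   ("evif".toList, "5"), ("enin".toList, "9"), ("eerht".toList, "3"), ("neves".toList, "7"),
   ("thgie".toList, "8")]

theorem fnwSliceTake (s : String) (n : Nat) :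
    (PySem.Str.slice s none (some (n : Int))).toList = s.toList.take n := by
  simp [pysem]

-- 'w in s[:n]' with n = len(w) is exactly 'the length-|w| prefix of s equals w'
theorem fnwCondA (w s : String) (n : Int) (hn : ((w.toList.length : Nat) : Int) = n) :
    PySem.Str.isIn w (PySem.Str.slice s none (some n)) =
    decide (s.toList.take w.toList.length = w.toList) := by
  subst hn
  have h1 := fnwSliceTake s w.toList.length
  rcases hb : PySem.Str.isIn w (PySem.Str.slice s none (some ((w.toList.length : Nat) : Int))) with _ | _
  · symm; simp only [decide_eq_false_iff_not]
    intro he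
    have h : PySem.Str.isIn w (PySem.Str.slice s none (some ((w.toList.length : Nat) : Int))) = true := by
      rw [PySem.Str.isIn_iff_infix, h1, he]
    rw [hb] at h; exact Bool.false_ne_true h
  · symm; simp only [decide_eq_true_eq]
    rw [PySem.Str.isIn_iff_infix, h1] at hb
    have hlen : (s.toList.take w.toList.length).length ≤ w.toList.length := by
      simp [List.length_take]
    exact (hb.eq_of_length (le_antisymm hb.length_le hlen)).symm

-- 'w == s[:n]' (dict-key hit) with n = len(w) is the same prefix condition
theorem fnwCondB (w s : String) (n : Int) (hn : ((w.toList.length : Nat) : Int) = n) :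
    (w == PySem.Str.slice s none (some n)) =
    decide (s.toList.take w.toList.length = w.toList) := by
  subst hn
  have h1 := fnwSliceTake s w.toList.length
  rw [Bool.beq_eq_decide_eq]
  rw [decide_eq_decide]
  constructor
  · intro h; rw [← String.toList_inj, h1] at h; exact h.symm
  · intro h; rw [← String.toList_inj, h1]; exact h.symm

theorem fnwPortA_false (s : String) : find_number_word s false = fnwChain s.toList fnwLAf := by
  simp only [find_number_word, fnwDigitsA, fnwLoopA, Bool.not_false, Bool.true_and,
    Bool.false_and, Bool.false_eq_true, if_false, PySem.Str.len_eq]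
  rw [fnwCondA "one" s _ (by decide), fnwCondA "two" s _ (by decide),
      fnwCondA "three" s _ (by decide), fnwCondA "four" s _ (by decide),
      fnwCondA "five" s _ (by decide), fnwCondA "six" s _ (by decide),
      fnwCondA "seven" s _ (by decide), fnwCondA "eight" s _ (by decide),
      fnwCondA "nine" s _ (by decide)]
  simp only [fnwChain, fnwLAf, decide_eq_true_eq]

theorem fnwPortA_true (s : String) : find_number_word s true = fnwChain s.toList fnwLAt := by
  simp only [find_number_word, fnwDigitsA, fnwLoopA, Bool.not_true, Bool.true_and,
    Bool.false_and, Bool.false_eq_true, if_false, PySem.Str.len_eq,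
    show (PySem.Str.slice? "one" (some (-1)) none (-1)).getD "one" = "eno" from rfl,
    show (PySem.Str.slice? "two" (some (-1)) none (-1)).getD "two" = "owt" from rfl,
    show (PySem.Str.slice? "three" (some (-1)) none (-1)).getD "three" = "eerht" from rfl,
    show (PySem.Str.slice? "four" (some (-1)) none (-1)).getD "four" = "ruof" from rfl,
    show (PySem.Str.slice? "five" (some (-1)) none (-1)).getD "five" = "evif" from rfl,
    show (PySem.Str.slice? "six" (some (-1)) none (-1)).getD "six" = "xis" from rfl,
    show (PySem.Str.slice? "seven" (some (-1)) none (-1)).getD "seven" = "neves" from rfl,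
    show (PySem.Str.slice? "eight" (some (-1)) none (-1)).getD "eight" = "thgie" from rfl,
    show (PySem.Str.slice? "nine" (some (-1)) none (-1)).getD "nine" = "enin" from rfl]
  rw [fnwCondA "eno" s _ (by decide), fnwCondA "owt" s _ (by decide),
      fnwCondA "eerht" s _ (by decide), fnwCondA "ruof" s _ (by decide),
      fnwCondA "evif" s _ (by decide), fnwCondA "xis" s _ (by decide),
      fnwCondA "neves" s _ (by decide), fnwCondA "thgie" s _ (by decide),
      fnwCondA "enin" s _ (by decide)]
  simp only [fnwChain, fnwLAt, decide_eq_true_eq]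

-- B's table build is a closed computation: evaluate it once per reverse flag
theorem fnwTableB_false (s : String) : find_number_word_alt s false =
    fnwLoopB s [(3, PySem.Dict.mk [("one", "1"), ("two", "2"), ("six", "6")]),
                (4, PySem.Dict.mk [("four", "4"), ("five", "5"), ("nine", "9")]),
                (5, PySem.Dict.mk [("three", "3"), ("seven", "7"), ("eight", "8")])] := rfl

theorem fnwTableB_true (s : String) : find_number_word_alt s true =
    fnwLoopB s [(3, PySem.Dict.mk [("eno", "1"), ("owt", "2"), ("xis", "6")]),
                (4, PySem.Dict.mk [("ruof", "4"), ("evif", "5"), ("enin", "9")]),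
                (5, PySem.Dict.mk [("eerht", "3"), ("neves", "7"), ("thgie", "8")])] := rfl

theorem fnwLoopB_mk_cons (s : String) (n : Int) (k v : String) (rest' : List (String × String))
    (rest : List (Int × PySem.Dict String String)) :
    fnwLoopB s ((n, PySem.Dict.mk ((k, v) :: rest')) :: rest) =
    if (k == PySem.Str.slice s none (some n)) then v
    else fnwLoopB s ((n, PySem.Dict.mk rest') :: rest) := by
  rw [fnwLoopB, PySem.Dict.get?_mk_cons]
  by_cases h : (k == PySem.Str.slice s none (some n)) = true
  · simp [h]
  · simp only [h]; rw [if_neg (by simp), if_neg (by simp), fnwLoopB]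

theorem fnwLoopB_mk_nil (s : String) (n : Int) (rest : List (Int × PySem.Dict String String)) :
    fnwLoopB s ((n, PySem.Dict.mk []) :: rest) = fnwLoopB s rest := by
  rw [fnwLoopB]; rfl

theorem fnwPortB_false (s : String) : find_number_word_alt s false = fnwChain s.toList fnwLBf := by
  rw [fnwTableB_false,
      fnwLoopB_mk_cons, fnwLoopB_mk_cons, fnwLoopB_mk_cons, fnwLoopB_mk_nil,
      fnwLoopB_mk_cons, fnwLoopB_mk_cons, fnwLoopB_mk_cons, fnwLoopB_mk_nil,
      fnwLoopB_mk_cons, fnwLoopB_mk_cons, fnwLoopB_mk_cons, fnwLoopB_mk_nil]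
  rw [fnwCondB "one" s 3 (by decide), fnwCondB "two" s 3 (by decide),
      fnwCondB "six" s 3 (by decide), fnwCondB "four" s 4 (by decide),
      fnwCondB "five" s 4 (by decide), fnwCondB "nine" s 4 (by decide),
      fnwCondB "three" s 5 (by decide), fnwCondB "seven" s 5 (by decide),
      fnwCondB "eight" s 5 (by decide)]
  simp only [fnwChain, fnwLBf, fnwLoopB, decide_eq_true_eq]

theorem fnwPortB_true (s : String) : find_number_word_alt s true = fnwChain s.toList fnwLBt := by
  rw [fnwTableB_true,
      fnwLoopB_mk_cons, fnwLoopB_mk_cons, fnwLoopB_mk_cons, fnwLoopB_mk_nil,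
      fnwLoopB_mk_cons, fnwLoopB_mk_cons, fnwLoopB_mk_cons, fnwLoopB_mk_nil,
      fnwLoopB_mk_cons, fnwLoopB_mk_cons, fnwLoopB_mk_cons, fnwLoopB_mk_nil]
  rw [fnwCondB "eno" s 3 (by decide), fnwCondB "owt" s 3 (by decide),
      fnwCondB "xis" s 3 (by decide), fnwCondB "ruof" s 4 (by decide),
      fnwCondB "evif" s 4 (by decide), fnwCondB "enin" s 4 (by decide),
      fnwCondB "eerht" s 5 (by decide), fnwCondB "neves" s 5 (by decide),
      fnwCondB "thgie" s 5 (by decide)]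
  simp only [fnwChain, fnwLBt, fnwLoopB, decide_eq_true_eq]

-- ===== VERDICT (by name: the statement is the Claim_ definition above) =====
theorem find_number_word_spec : Claim_equal_find_number_word := by
  intro s reverse _
  unfold Spec_find_number_word
  cases reverse with
  | false =>
    rw [fnwPortA_false, fnwPortB_false]
    exact fnwChain_perm _ _ _ (by decide) (by decide)
  | true =>
    rw [fnwPortA_true, fnwPortB_true]
    exact fnwChain_perm _ _ _ (by decide) (by decide)
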